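-- pv_equiv track=rewrite | github.com/Kedlub/battle-engine | src/battle_engine/text.py | preprocess_target_text
-- ===== SOURCE A (Python) =====
-- def preprocess_target_text(
--
--     target_text: str,
-- ) -> tuple[dict[int, list[str]], str]:
--     index = 0
--     command_positions: dict[int, list[str]] = {}
--     clean_text = ""
--
--     while index < len(target_text):
--         if target_text[index] == "[":
--             command_start = index
--             command_end = target_text.find("]", command_start)
--
--             if command_end != -1:
--                 commands = target_text[command_start + 1 : command_end].split("][")
--
--                 if len(clean_text) not in command_positions:
--                     command_positions[len(clean_text)] = []
--
--                 for cmd in commands: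
--                     command_positions[len(clean_text)].append(cmd)
--
--                 index = command_end + 1
--                 continue
--
--         clean_text += target_text[index]
--         index += 1
--
--     return command_positions, clean_text
-- ===== SOURCE B (Python) =====
-- def preprocess_target_text(
--     target_text: str,
-- ) -> tuple[dict[int, list[str]], str]:
--     command_positions: dict[int, list[str]] = {}
--     parts: list[str] = []
--     clean_len = 0
--     i = 0
--     n = len(target_text)
--     while i < n:
--         nb = target_text.find("[", i)
--         if nb == -1:
--             parts.append(target_text[i:])
--             break
--         chunk = target_text[i:nb]
--         parts.append(chunk)
--         clean_len += len(chunk)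
--         end = target_text.find("]", nb + 1)
--         if end == -1:
--             parts.append("[")
--             clean_len += 1
--             i = nb + 1
--         else:
--             commands = target_text[nb + 1 : end].split("][")
--             command_positions.setdefault(clean_len, []).extend(commands)
--             i = end + 1
--     return command_positions, "".join(parts)
-- ===== Notes on version B (the rewrite author's own statement) =====
-- stated objective: faster
-- what changed: A scans character by character, growing clean_text by string concatenation one char at a time; B jumps between brackets with find('[', i), copies each literal chunk whole into a parts list, tracks the clean length as a counter, and joins the parts once at the end.
import Mathlib
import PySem

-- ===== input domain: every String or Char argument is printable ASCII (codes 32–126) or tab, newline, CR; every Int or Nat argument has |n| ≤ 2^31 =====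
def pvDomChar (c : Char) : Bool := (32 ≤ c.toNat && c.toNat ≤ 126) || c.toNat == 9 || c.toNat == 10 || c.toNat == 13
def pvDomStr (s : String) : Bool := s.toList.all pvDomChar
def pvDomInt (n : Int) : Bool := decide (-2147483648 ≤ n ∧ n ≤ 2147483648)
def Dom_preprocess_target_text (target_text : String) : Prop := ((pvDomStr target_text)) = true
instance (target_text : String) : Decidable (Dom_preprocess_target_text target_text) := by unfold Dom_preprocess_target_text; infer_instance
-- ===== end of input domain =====

-- B re-implements A's char-by-char scan (which grows clean_text by one-char string
-- concatenations) as a chunk-jumping loop: find the next '[', copy the literal chunk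
-- whole into a parts list, record the bracket group, join the parts once at the end;
-- same return value, measured faster in a timing run.

-- ===== PORT A =====
-- The while-loop over `index` is transcribed as recursion on the remaining suffix of
-- the character list.  `target_text.find("]", command_start)` (with
-- target_text[command_start] = '[') is exact as `find` of "]" in the suffix AFTER that
-- '[': the scan is left-to-right and '[' ≠ ']', so the occurrence found is the same one,
-- its index shifted by command_start + 1; the slice and the jump below use that shift.
def loopA_pv : List Char → PySem.Dict Int (List String) → List Char →
    PySem.Dict Int (List String) × List Char
  | [], cps, clean => (cps, clean)
  | c :: tail, cps, clean =>
    if c = '[' ∧ PySem.Chars.find tail [']'] ≠ -1 then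
      -- command_end found: commands = target_text[command_start+1 : command_end].split("][")
      let e := (PySem.Chars.find tail [']']).toNat
      let commands := (PySem.Chars.splitOn (tail.take e) "][".toList).map String.ofList
      let key : Int := (clean.length : Int)
      let cps1 := if cps.contains key then cps else cps.insert key []
      let cps2 := commands.foldl (fun d cmd => d.modify key [] (fun l => l ++ [cmd])) cps1
      loopA_pv (tail.drop (e + 1)) cps2 clean
    else
      -- clean_text += target_text[index]; index += 1
      loopA_pv tail cps (clean ++ [c])
termination_by rest _ _ => rest.length
decreasing_by
  all_goals simp

def preprocess_target_text (target_text : String) : (List (Int × List String)) × String :=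
  let r := loopA_pv target_text.toList PySem.Dict.empty []
  (r.1.items, String.ofList r.2)

-- ===== PORT B =====
-- Source B's loop: find the next '[' from i (here: in the remaining suffix); if none, emit
-- the rest and stop; otherwise emit the literal chunk, then look for ']' after the '['
-- (Source B's find("]", nb + 1), exact as `find` in the suffix after the '['); unmatched
-- '[' is emitted as a one-char part, a matched group is recorded with setdefault+extend.
def loopB_pv (rest : List Char) (cps : PySem.Dict Int (List String)) (cleanLen : Nat)
    (parts : List (List Char)) : PySem.Dict Int (List String) × List (List Char) :=
  if hnb : PySem.Chars.find rest ['['] = -1 then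
    (cps, parts ++ [rest])
  else
    let nbn := (PySem.Chars.find rest ['[']).toNat
    let chunk := rest.take nbn
    let len1 := cleanLen + chunk.length
    let tail := rest.drop (nbn + 1)
    let e := PySem.Chars.find tail [']']
    if e = -1 then
      loopB_pv tail cps (len1 + 1) ((parts ++ [chunk]) ++ [['[']])
    else
      let commands := (PySem.Chars.splitOn (tail.take e.toNat) "][".toList).map String.ofList
      let cps1 := (cps.setdefault (len1 : Int) []).modify (len1 : Int) [] (fun l => l ++ commands)
      loopB_pv (tail.drop (e.toNat + 1)) cps1 len1 (parts ++ [chunk])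
termination_by rest.length
decreasing_by
  all_goals
    cases rest with
    | nil => exact absurd (by decide) hnb
    | cons c t => simp

def preprocess_target_text_alt (target_text : String) : (List (Int × List String)) × String :=
  let r := loopB_pv target_text.toList PySem.Dict.empty 0 []
  (r.1.items, String.ofList r.2.flatten)

-- ===== PRECONDITION & SPEC =====
def Spec_preprocess_target_text (target_text : String) (out : (List (Int × List String)) × String) : Prop := out = preprocess_target_text_alt target_text
instance (target_text : String) (out : (List (Int × List String)) × String) : Decidable (Spec_preprocess_target_text target_text out) := by unfold Spec_preprocess_target_text; infer_instance

-- ===== CLAIM (what is proved, stated in full; the proofs are below) =====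
def Claim_equal_preprocess_target_text : Prop := ∀ (target_text : String), Dom_preprocess_target_text target_text → Spec_preprocess_target_text target_text (preprocess_target_text target_text)

-- ===== LEMMAS AND PROOFS =====

-- Two modifies at the same key compose.
theorem pv_modify_modify (d : PySem.Dict Int (List String)) (k : Int)
    (d0 d0' : List String) (f g : List String → List String) :
    (d.modify k d0 f).modify k d0' g = d.modify k d0 (fun v => g (f v)) := by
  simp [PySem.Dict.modify, PySem.Dict.getD_insert_self, PySem.Dict.insert_insert_self]

-- A's per-command append loop, started from any modify at the key, is one extend.
theorem pv_foldl_modify (k : Int) (d0 : List String) :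
    ∀ (cmds : List String) (f : List String → List String) (d : PySem.Dict Int (List String)),
      cmds.foldl (fun d c => d.modify k [] (fun l => l ++ [c])) (d.modify k d0 f)
        = d.modify k d0 (fun v => f v ++ cmds) := by
  intro cmds
  induction cmds with
  | nil => intro f d; simp
  | cons c cs ih =>
    intro f d
    rw [List.foldl_cons, pv_modify_modify, ih]
    congr 1; funext v; simp

-- A's membership-test + per-command appends equal B's setdefault + extend (nonempty cmds).
theorem pv_group_eq (cps : PySem.Dict Int (List String)) (k : Int) (c : String) (cs : List String) :
    (c :: cs).foldl (fun d cmd => d.modify k [] (fun l => l ++ [cmd]))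
        (if cps.contains k then cps else cps.insert k [])
      = (cps.setdefault k []).modify k [] (fun l => l ++ (c :: cs)) := by
  by_cases h : cps.contains k = true
  · rw [PySem.Dict.setdefault_of_contains cps [] h, if_pos h, List.foldl_cons]
    rw [pv_foldl_modify]
    congr 1; funext v; simp
  · have h' : cps.contains k = false := by simpa using h
    rw [PySem.Dict.setdefault_of_not_contains cps [] h', if_neg h]
    have hins : cps.insert k [] = cps.modify k [] (fun _ => []) := by
      simp [PySem.Dict.modify]
    rw [hins, List.foldl_cons, pv_modify_modify, pv_foldl_modify, pv_modify_modify]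
    congr 1

theorem pv_splitOn_go_ne_nil (sep : List Char) :
    ∀ (fuel : Nat) (l cur : List Char) (acc : List (List Char)),
      PySem.Chars.splitOn.go sep fuel l cur acc ≠ [] := by
  intro fuel
  induction fuel with
  | zero => intro l cur acc; simp [PySem.Chars.splitOn.go]
  | succ n ih =>
    intro l cur acc
    cases l with
    | nil => simp [PySem.Chars.splitOn.go]
    | cons c rest =>
      rw [PySem.Chars.splitOn.go]
      split
      · exact ih _ _ _
      · exact ih _ _ _

theorem pv_splitOn_ne_nil (s sep : List Char) : PySem.Chars.splitOn s sep ≠ [] :=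
  pv_splitOn_go_ne_nil sep _ s [] []

theorem pv_drop_cons (l : List Char) (n : Nat) (h : n < l.length) :
    l.drop n = l[n] :: l.drop (n + 1) :=
  List.drop_eq_getElem_cons h

-- The first occurrence of c in rest splits it as (no-c prefix) ++ c :: (rest after it).
theorem pv_find_char (rest : List Char) (c : Char) (h : PySem.Chars.find rest [c] ≠ -1) :
    (PySem.Chars.find rest [c]).toNat < rest.length ∧
    rest.drop (PySem.Chars.find rest [c]).toNat = c :: rest.drop ((PySem.Chars.find rest [c]).toNat + 1) ∧
    c ∉ rest.take (PySem.Chars.find rest [c]).toNat := by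
  have h0 : 0 ≤ PySem.Chars.find rest [c] := by
    have := PySem.Chars.neg_one_le_find (s := rest) (sub := [c])
    omega
  obtain ⟨hpre, hmin⟩ := PySem.Chars.find_spec (s := rest) (sub := [c]) h0
  set n := (PySem.Chars.find rest [c]).toNat with hn
  have hlt : n < rest.length := by
    rcases hpre with ⟨t, ht⟩
    have : n ≤ rest.length := by
      have := PySem.Chars.find_le_length (s := rest) (sub := [c])
      omega
    by_contra hge
    have : rest.drop n = [] := List.drop_eq_nil_of_le (by omega)
    simp [this] at ht
  have hdc : rest.drop n = rest[n] :: rest.drop (n + 1) := pv_drop_cons rest n hlt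
  have hcn : rest[n] = c := by
    rcases hpre with ⟨t, ht⟩
    rw [hdc] at ht
    have := congrArg List.head? ht
    simp [List.getElem?_eq_getElem hlt] at this
    exact this.symm
  refine ⟨hlt, by rw [hdc, hcn], ?_⟩
  intro hm
  obtain ⟨i, hi, hgi⟩ := List.getElem_of_mem hm
  have hi' : i < n := by simp at hi; omega
  have hic : rest[i] = c := by
    rw [List.getElem_take] at hgi; exact hgi
  exact hmin i hi' ⟨rest.drop (i + 1), by rw [pv_drop_cons rest i (by omega), hic]; rfl⟩

-- loopA walks over a bracket-free prefix char by char, appending it to clean.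
theorem pv_loopA_skip (pre : List Char) :
    ∀ (rest : List Char) (cps : PySem.Dict Int (List String)) (clean : List Char),
      '[' ∉ pre → loopA_pv (pre ++ rest) cps clean = loopA_pv rest cps (clean ++ pre) := by
  induction pre with
  | nil => intro rest cps clean _; simp
  | cons c p ih =>
    intro rest cps clean h
    have hc : ¬ (c = '[') := fun hc => h (by simp [hc])
    rw [List.cons_append, loopA_pv, if_neg (by simp [hc]),
      ih _ _ _ (fun hm => h (List.mem_cons_of_mem _ hm))]
    simp

theorem pv_loopA_no_bracket (l : List Char) (cps : PySem.Dict Int (List String))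
    (clean : List Char) (h : '[' ∉ l) : loopA_pv l cps clean = (cps, clean ++ l) := by
  rw [← List.append_nil l, pv_loopA_skip l [] cps clean h, loopA_pv]
  simp

theorem pv_main : ∀ (N : Nat) (rest : List Char), rest.length ≤ N →
    ∀ (cps : PySem.Dict Int (List String)) (parts : List (List Char)),
      loopA_pv rest cps parts.flatten
        = ((loopB_pv rest cps parts.flatten.length parts).1,
           (loopB_pv rest cps parts.flatten.length parts).2.flatten) := by
  intro N
  induction N with
  | zero =>
    intro rest hlen cps parts
    have hr : rest = [] := List.eq_nil_of_length_eq_zero (by omega)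
    subst hr
    rw [loopA_pv, loopB_pv, dif_pos (by decide)]
    simp
  | succ N ih =>
    intro rest hlen cps parts
    by_cases hnb : PySem.Chars.find rest ['['] = -1
    · have hno : '[' ∉ rest := by
        intro hm
        have h1 := (PySem.Chars.find_ne_neg_one_iff (s := rest) (sub := ['['])).mpr
          ((List.singleton_infix_iff _ _).mpr hm)
        exact h1 hnb
      rw [pv_loopA_no_bracket _ _ _ hno, loopB_pv, dif_pos hnb]
      simp
    · obtain ⟨hlt, hdc, hpre⟩ := pv_find_char rest '[' hnb
      have hsplit : rest = rest.take ((PySem.Chars.find rest ['[']).toNat)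
          ++ '[' :: rest.drop ((PySem.Chars.find rest ['[']).toNat + 1) := by
        conv_lhs => rw [← List.take_append_drop ((PySem.Chars.find rest ['[']).toNat) rest]
        rw [hdc]
      rw [loopB_pv, dif_neg hnb]
      set n := (PySem.Chars.find rest ['[']).toNat with hn
      conv_lhs => rw [hsplit]
      rw [pv_loopA_skip _ _ _ _ hpre]
      have htlen : (rest.drop (n + 1)).length ≤ N := by simp; omega
      by_cases he : PySem.Chars.find (rest.drop (n + 1)) [']'] = -1
      · rw [loopA_pv, if_neg (by simp [he])]
        simp only [he, reduceIte]
        have h2 := ih (rest.drop (n + 1)) htlen cps ((parts ++ [rest.take n]) ++ [['[']])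
        simp only [List.flatten_append, List.flatten_cons, List.flatten_nil,
          List.append_nil, List.length_append, List.length_cons, List.length_nil] at h2 ⊢
        rw [h2]
      · rw [loopA_pv, if_pos ⟨rfl, he⟩]
        simp only [he, reduceIte]
        have hcne : ((PySem.Chars.splitOn ((rest.drop (n + 1)).take
            (PySem.Chars.find (rest.drop (n + 1)) [']']).toNat) "][".toList).map String.ofList) ≠ [] := by
          simp [pv_splitOn_ne_nil]
        obtain ⟨c0, cs0, hcmds⟩ := List.exists_cons_of_ne_nil hcne
        have h2 := ih ((rest.drop (n + 1)).drop ((PySem.Chars.find (rest.drop (n + 1)) [']']).toNat + 1))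
          (by simp; omega)
          ((cps.setdefault ((parts.flatten ++ rest.take n).length : Int) []).modify
            ((parts.flatten ++ rest.take n).length : Int) []
            (fun l => l ++ (c0 :: cs0)))
          (parts ++ [rest.take n])
        simp only [List.flatten_append, List.flatten_cons, List.flatten_nil,
          List.append_nil, List.length_append] at h2 ⊢
        rw [hcmds, pv_group_eq, h2, ← hcmds]

-- ===== VERDICT (by name: the statement is the Claim_ definition above) =====
theorem preprocess_target_text_spec : Claim_equal_preprocess_target_text := by
  intro s _
  unfold Spec_preprocess_target_text preprocess_target_text preprocess_target_text_alt
  have h := pv_main s.toList.length s.toList le_rfl PySem.Dict.empty []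
  simp only [List.flatten_nil, List.length_nil] at h
  rw [h]
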